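-- pv_equiv track=rewrite | github.com/ManjaKang/TIL | BOJ/실버이하/일곱난쟁이.py | isInCase
-- ===== SOURCE A (Python) =====
-- def isInCase(c):
--     cnt = 0
--     while c > 0:
--         c &= c - 1
--         cnt += 1
--     if cnt == 7:
--         return True
--     else:
--         return False
-- ===== SOURCE B (Python) =====
-- def isInCase(c):
--     cnt = 0
--     while c > 0:
--         cnt += c & 1
--         c >>= 1
--     return cnt == 7
-- ===== Notes on version B (the rewrite author's own statement) =====
-- stated objective: alternative
-- what changed: Replaces Kernighan's clear-lowest-set-bit loop (one iteration per set bit) with a shift-and-mask bit scan (one iteration per bit position), returning the comparison directly instead of via if/else.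
import Mathlib
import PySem

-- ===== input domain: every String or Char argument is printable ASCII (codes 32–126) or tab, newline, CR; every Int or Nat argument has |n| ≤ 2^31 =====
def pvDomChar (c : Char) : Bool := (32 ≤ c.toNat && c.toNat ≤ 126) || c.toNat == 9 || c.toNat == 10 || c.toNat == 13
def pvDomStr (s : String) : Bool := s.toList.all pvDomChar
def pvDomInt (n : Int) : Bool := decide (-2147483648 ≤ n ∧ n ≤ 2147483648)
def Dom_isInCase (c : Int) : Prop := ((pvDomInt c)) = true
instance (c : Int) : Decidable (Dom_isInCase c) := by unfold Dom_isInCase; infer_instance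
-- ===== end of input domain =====

-- B replaces Kernighan's clear-lowest-set-bit loop with a shift-and-mask bit scan; same result, proved equal.


-- ===== PORT A =====
-- loop `while c > 0: c &= c - 1; cnt += 1`  (Python's `&` on ints is Int.land)
def isInCaseKern (c : Int) (cnt : Int) : Int :=
  if h : c > 0 then isInCaseKern (Int.land c (c - 1)) (cnt + 1) else cnt
termination_by c.toNat
decreasing_by
  obtain ⟨n, rfl⟩ := Int.eq_ofNat_of_zero_le (le_of_lt h)
  have h1 : ((n : Int)) - 1 = ((n - 1 : Nat) : Int) := by omega
  have h2 : Int.land (n : Int) ((n - 1 : Nat) : Int) = ((Nat.land n (n - 1) : Nat) : Int) := rfl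
  rw [h1, h2]
  simp only [Int.toNat_natCast]
  exact lt_of_le_of_lt (Nat.and_le_right) (by omega)

def isInCase (c : Int) : Bool :=
  if isInCaseKern c 0 = 7 then true else false

-- ===== PORT B =====
-- loop `while c > 0: cnt += c & 1; c >>= 1`  (Python's `>>` on ints is Int.shiftRight)
def isInCaseScan (c : Int) (cnt : Int) : Int :=
  if h : c > 0 then isInCaseScan (Int.shiftRight c 1) (cnt + Int.land c 1) else cnt
termination_by c.toNat
decreasing_by
  obtain ⟨n, rfl⟩ := Int.eq_ofNat_of_zero_le (le_of_lt h)
  have h2 : Int.shiftRight (n : Int) 1 = ((Nat.shiftRight n 1 : Nat) : Int) := rfl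
  rw [h2]
  simp only [Int.toNat_natCast]
  have hdiv : Nat.shiftRight n 1 = n / 2 := rfl
  omega

def isInCase_alt (c : Int) : Bool := isInCaseScan c 0 == 7

-- ===== PRECONDITION & SPEC =====
def Spec_isInCase (c : Int) (out : Bool) : Prop := out = isInCase_alt c
instance (c : Int) (out : Bool) : Decidable (Spec_isInCase c out) := by unfold Spec_isInCase; infer_instance

-- ===== CLAIM (what is proved, stated in full; the proofs are below) =====
def Claim_equal_isInCase : Prop := ∀ (c : Int), Dom_isInCase c → Spec_isInCase c (isInCase c)

-- ===== LEMMAS AND PROOFS =====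

-- reference popcount on Nat
def pvPopcnt (n : Nat) : Nat :=
  if n = 0 then 0 else n % 2 + pvPopcnt (n / 2)
decreasing_by omega

theorem pvPopcnt_two_mul (m : Nat) : pvPopcnt (2 * m) = pvPopcnt m := by
  rcases Nat.eq_zero_or_pos m with h | h
  · subst h; rfl
  · rw [pvPopcnt, if_neg (by omega : ¬ 2 * m = 0), Nat.mul_mod_right,
        Nat.mul_div_cancel_left m (by omega : 0 < 2)]
    omega

theorem pvLand_odd (m : Nat) : (2 * m + 1) &&& (2 * m) = 2 * m := by
  apply Nat.eq_of_testBit_eq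
  intro i
  cases i with
  | zero => simp [Nat.testBit_zero]
  | succ i =>
      rw [Nat.testBit_and, Nat.testBit_succ, Nat.testBit_succ,
          (by omega : (2 * m + 1) / 2 = m), (by omega : (2 * m) / 2 = m)]
      simp

theorem pvLand_even (m : Nat) (h : 0 < m) :
    (2 * m) &&& (2 * m - 1) = 2 * (m &&& (m - 1)) := by
  apply Nat.eq_of_testBit_eq
  intro i
  cases i with
  | zero => simp [Nat.testBit_zero, Nat.mul_mod_right]
  | succ i =>
      rw [Nat.testBit_and, Nat.testBit_succ, Nat.testBit_succ, Nat.testBit_succ,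
          (by omega : (2 * m) / 2 = m), (by omega : (2 * m - 1) / 2 = m - 1),
          (by omega : (2 * (m &&& (m - 1))) / 2 = m &&& (m - 1))]
      rw [Nat.testBit_and]

-- clearing the lowest set bit removes exactly one set bit
theorem pvPopcnt_land_pred (n : Nat) (h : 0 < n) :
    pvPopcnt n = pvPopcnt (n &&& (n - 1)) + 1 := by
  induction n using Nat.strong_induction_on with
  | _ n ih =>
    rcases Nat.even_or_odd n with ⟨m, hm⟩ | ⟨m, hm⟩
    · have hm' : n = 2 * m := by omega
      subst hm'
      have hmpos : 0 < m := by omega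
      rw [pvLand_even m hmpos, pvPopcnt_two_mul, pvPopcnt_two_mul,
          ih m (by omega) hmpos]
    · subst hm
      rw [(by omega : 2 * m + 1 - 1 = 2 * m), pvLand_odd, pvPopcnt_two_mul]
      rw [pvPopcnt]
      simp [(by omega : (2 * m + 1) % 2 = 1), (by omega : (2 * m + 1) / 2 = m)]
      omega

theorem pvKern_eq (n : Nat) : ∀ cnt : Int, isInCaseKern (n : Int) cnt = cnt + (pvPopcnt n : Int) := by
  induction n using Nat.strong_induction_on with
  | _ n ih =>
    intro cnt
    rcases Nat.eq_zero_or_pos n with h | h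
    · subst h
      rw [isInCaseKern, pvPopcnt]
      simp
    · rw [isInCaseKern]
      have hpos : ((n : Int)) > 0 := by exact_mod_cast h
      have h1 : ((n : Int)) - 1 = ((n - 1 : Nat) : Int) := by omega
      have h2 : Int.land (n : Int) ((n - 1 : Nat) : Int) = (((n &&& (n - 1)) : Nat) : Int) := rfl
      rw [dif_pos hpos, h1, h2, ih (n &&& (n - 1)) (lt_of_le_of_lt Nat.and_le_right (by omega))]
      rw [pvPopcnt_land_pred n h]
      push_cast
      ring

theorem pvScan_eq (n : Nat) : ∀ cnt : Int, isInCaseScan (n : Int) cnt = cnt + (pvPopcnt n : Int) := by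
  induction n using Nat.strong_induction_on with
  | _ n ih =>
    intro cnt
    rcases Nat.eq_zero_or_pos n with h | h
    · subst h
      rw [isInCaseScan, pvPopcnt]
      simp
    · rw [isInCaseScan]
      have hpos : ((n : Int)) > 0 := by exact_mod_cast h
      have h2 : Int.shiftRight (n : Int) 1 = ((Nat.shiftRight n 1 : Nat) : Int) := rfl
      have h3 : Int.land (n : Int) ((1 : Nat) : Int) = (((n &&& 1) : Nat) : Int) := rfl
      have hdiv : Nat.shiftRight n 1 = n / 2 := rfl
      rw [dif_pos hpos, h2, (by norm_num : (1 : Int) = ((1 : Nat) : Int)), h3,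
          ih (Nat.shiftRight n 1) (by omega)]
      conv_rhs => rw [pvPopcnt]
      rw [if_neg (by omega : ¬ n = 0), hdiv, Nat.and_one_is_mod]
      push_cast
      ring

theorem pvLoops_eq (c : Int) : isInCaseKern c 0 = isInCaseScan c 0 := by
  by_cases h : c > 0
  · obtain ⟨n, rfl⟩ := Int.eq_ofNat_of_zero_le (le_of_lt h)
    rw [pvKern_eq, pvScan_eq]
  · rw [isInCaseKern, isInCaseScan]
    simp [h]

-- ===== VERDICT (by name: the statement is the Claim_ definition above) =====
theorem isInCase_spec : Claim_equal_isInCase := by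
  intro c _
  unfold Spec_isInCase isInCase isInCase_alt
  rw [pvLoops_eq]
  by_cases h : isInCaseScan c 0 = 7 <;> simp [h]
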